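-- pv_equiv track=rewrite | github.com/KoroteevaS/AI_course | assign1_to_submit/part1/assign-1-1-2.py | find_centroids_coordinates
-- ===== SOURCE A (Python) =====
-- def find_centroids_coordinates(index_dict, wine_training_array):
--
-- 	"""Finding coordinates for all the points assignted to the  centroid
-- 	Arguments:
-- 		index_dict(dict) - dictionary of centroid with indexes of instances
-- 	Returns:
-- 		centroids_coordinates(dict) - with centroids index as key and lists of coordinates of all the points assigned
--
-- 	"""
-- 	centroids_coordinates = {}
-- 	for i in index_dict.keys():
-- 		my_list = index_dict[i]
-- 		for ind , instance in enumerate(wine_training_array):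
-- 			if ind in my_list:
-- 				if not i in centroids_coordinates.keys():
-- 					centroids_coordinates[i] = [instance]
-- 				else:
-- 					centroids_coordinates[i] +=[instance]
--
-- 	return(centroids_coordinates)
-- ===== SOURCE B (Python) =====
-- def find_centroids_coordinates(index_dict, wine_training_array):
--     n = len(wine_training_array)
--     out = {}
--     for i, my_list in index_dict.items():
--         idxs = sorted(set(j for j in my_list if 0 <= j < n))
--         if idxs:
--             out[i] = [wine_training_array[j] for j in idxs]
--     return out
-- ===== Notes on version B (the rewrite author's own statement) =====
-- stated objective: faster
-- what changed: Instead of scanning every instance once per centroid and testing membership in the raw index list, B computes each centroid's sorted set of valid indices and indexes the training array directly.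
import Mathlib
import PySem

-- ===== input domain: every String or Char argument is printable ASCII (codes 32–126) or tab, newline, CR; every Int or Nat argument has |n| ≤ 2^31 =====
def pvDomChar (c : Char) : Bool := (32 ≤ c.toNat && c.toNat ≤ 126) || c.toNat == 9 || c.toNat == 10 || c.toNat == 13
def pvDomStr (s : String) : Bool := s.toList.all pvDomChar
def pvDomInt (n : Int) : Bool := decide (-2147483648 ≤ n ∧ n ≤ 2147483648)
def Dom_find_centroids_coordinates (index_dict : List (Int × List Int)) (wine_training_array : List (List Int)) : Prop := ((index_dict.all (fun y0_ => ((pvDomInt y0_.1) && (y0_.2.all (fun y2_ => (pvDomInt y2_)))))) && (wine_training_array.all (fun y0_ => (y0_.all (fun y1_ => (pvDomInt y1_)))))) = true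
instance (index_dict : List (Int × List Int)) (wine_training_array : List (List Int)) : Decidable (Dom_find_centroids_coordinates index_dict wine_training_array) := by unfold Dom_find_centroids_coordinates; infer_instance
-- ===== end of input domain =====

-- B groups by indexing the training array at each centroid's sorted set of valid indices
-- instead of scanning every instance per centroid (objective: faster).


-- ===== PORT A =====
def find_centroids_coordinates (index_dict : List (Int × List Int)) (wine_training_array : List (List Int)) : List (Int × List (List Int)) :=
  let d := PySem.Dict.ofList index_dict   -- the input dict, as Python receives it
  -- centroids_coordinates = {}; for i in index_dict.keys(): …
  ((d.keys).foldl (fun cc i =>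
    let my_list := d.getD i []            -- index_dict[i]; i is a key, so the lookup succeeds (exact via getD)
    -- for ind, instance in enumerate(wine_training_array): …
    (PySem.List.enumerate wine_training_array 0).foldl (fun cc p =>
      if my_list.contains p.1 then
        if !(cc.contains i) then cc.insert i [p.2]
        else cc.insert i (cc.getD i [] ++ [p.2])   -- cc[i] += [instance]; i is present here, getD is exact
      else cc) cc) PySem.Dict.empty).items

-- ===== PORT B =====
def find_centroids_coordinates_alt (index_dict : List (Int × List Int)) (wine_training_array : List (List Int)) : List (Int × List (List Int)) :=
  let d := PySem.Dict.ofList index_dict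
  let n := PySem.List.len wine_training_array
  ((d.items).foldl (fun out p =>
    let idxs := PySem.List.sorted (PySem.Set.ofList (p.2.filter (fun j => decide (0 ≤ j) && decide (j < n)))) (fun x => x) false
    if idxs.isEmpty then out
    else out.insert p.1 (idxs.map (fun j => PySem.List.pyGetD wine_training_array j []))) PySem.Dict.empty).items

-- ===== PRECONDITION & SPEC =====
def Spec_find_centroids_coordinates (index_dict : List (Int × List Int)) (wine_training_array : List (List Int)) (out : List (Int × List (List Int))) : Prop := out = find_centroids_coordinates_alt index_dict wine_training_array
instance (index_dict : List (Int × List Int)) (wine_training_array : List (List Int)) (out : List (Int × List (List Int))) : Decidable (Spec_find_centroids_coordinates index_dict wine_training_array out) := by unfold Spec_find_centroids_coordinates; infer_instance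

-- ===== CLAIM (what is proved, stated in full; the proofs are below) =====
def Claim_equal_find_centroids_coordinates : Prop := ∀ (index_dict : List (Int × List Int)) (wine_training_array : List (List Int)), Dom_find_centroids_coordinates index_dict wine_training_array → Spec_find_centroids_coordinates index_dict wine_training_array (find_centroids_coordinates index_dict wine_training_array)

-- ===== LEMMAS AND PROOFS =====

-- A's inner loop over the instances, for one centroid i with index list L:
-- it appends to cc exactly the entry (i, matched) when matched ≠ [].
theorem innerA {α : Type} (i : Int) (L : List Int) (ps : List (Int × α)) :
  ∀ (cc : PySem.Dict Int (List α)),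
  ps.foldl (fun cc p => if L.contains p.1 then (if !(cc.contains i) then cc.insert i [p.2] else cc.insert i (cc.getD i [] ++ [p.2])) else cc) cc
  = (if ((ps.filter (fun p => L.contains p.1)).map (·.2)) = [] then cc
     else cc.insert i (cc.getD i [] ++ (ps.filter (fun p => L.contains p.1)).map (·.2))) := by
  induction ps with
  | nil => intro cc; simp
  | cons p ps ih =>
    intro cc
    simp only [List.foldl_cons, List.filter_cons]
    by_cases h : L.contains p.1 = true
    · simp only [h, if_true, List.map_cons]
      rw [if_neg (List.cons_ne_nil _ _)]
      by_cases hc : cc.contains i = true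
      · simp only [hc, Bool.not_true, Bool.false_eq_true, if_false]
        rw [ih]
        by_cases hm : ((ps.filter (fun p => L.contains p.1)).map (·.2)) = []
        · rw [if_pos hm, hm]
        · rw [if_neg hm, PySem.Dict.insert_insert_self, PySem.Dict.getD_insert_self,
              List.append_assoc, List.singleton_append]
      · have hc' : cc.contains i = false := by revert hc; cases (cc.contains i) <;> simp
        simp only [hc', Bool.not_false, if_true]
        rw [ih, PySem.Dict.getD_of_not_contains cc ([] : List α) hc', List.nil_append]
        by_cases hm : ((ps.filter (fun p => L.contains p.1)).map (·.2)) = []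
        · rw [if_pos hm, hm]
        · rw [if_neg hm, PySem.Dict.insert_insert_self, PySem.Dict.getD_insert_self,
              List.singleton_append]
    · have h' : L.contains p.1 = false := by revert h; cases (L.contains p.1) <;> simp
      simp only [h', Bool.false_eq_true, if_false]
      exact ih cc

-- A's outer loop over distinct fresh keys: the result's items are the accumulated items
-- followed by one appended entry per key with a non-empty match.
theorem outerA {α : Type} (myl : Int → List Int) (q : List (Int × α)) (ks : List Int) :
  ∀ (cc : PySem.Dict Int (List α)), ks.Nodup → (∀ k ∈ ks, cc.contains k = false) →
  (ks.foldl (fun cc i =>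
      q.foldl (fun cc p => if (myl i).contains p.1 then (if !(cc.contains i) then cc.insert i [p.2] else cc.insert i (cc.getD i [] ++ [p.2])) else cc) cc) cc).items
  = cc.items ++ ks.flatMap (fun i =>
      if ((q.filter (fun p => (myl i).contains p.1)).map (·.2)) = [] then []
      else [(i, (q.filter (fun p => (myl i).contains p.1)).map (·.2))]) := by
  induction ks with
  | nil => intro cc _ _; simp
  | cons k ks ih =>
    intro cc hnd hcf
    have hck : cc.contains k = false := hcf k (List.mem_cons_self ..)
    have hknot : k ∉ ks := (List.nodup_cons.mp hnd).1
    simp only [List.foldl_cons, List.flatMap_cons]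
    rw [innerA k (myl k) q cc]
    by_cases hm : ((q.filter (fun p => (myl k).contains p.1)).map (·.2)) = []
    · rw [if_pos hm, if_pos hm,
          ih cc (List.nodup_cons.mp hnd).2 (fun k' hk' => hcf k' (List.mem_cons_of_mem _ hk')),
          List.nil_append]
    · rw [if_neg hm, if_neg hm, PySem.Dict.getD_of_not_contains cc ([] : List α) hck, List.nil_append]
      rw [ih (cc.insert k _) (List.nodup_cons.mp hnd).2 ?fresh]
      case fresh =>
        intro k' hk'
        rw [PySem.Dict.contains_insert]
        have hne : k' ≠ k := fun e => hknot (e ▸ hk')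
        simp [hne, hcf k' (List.mem_cons_of_mem _ hk')]
      rw [PySem.Dict.items_insert_of_not_contains cc _ hck, List.append_assoc, List.singleton_append]

-- B's loop over the dict's items (distinct fresh keys): same appended-items shape.
theorem outerB {β ν : Type} (cond : β → Bool) (v : β → ν) (ps : List (Int × β)) :
  ∀ (out : PySem.Dict Int ν), (ps.map (fun p => p.1)).Nodup → (∀ p ∈ ps, out.contains p.1 = false) →
  (ps.foldl (fun out p => if cond p.2 then out else out.insert p.1 (v p.2)) out).items
  = out.items ++ ps.flatMap (fun p => if cond p.2 then [] else [(p.1, v p.2)]) := by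
  induction ps with
  | nil => intro out _ _; simp
  | cons p ps ih =>
    intro out hnd hcf
    simp only [List.map_cons, List.nodup_cons] at hnd
    simp only [List.foldl_cons, List.flatMap_cons]
    by_cases hc : cond p.2 = true
    · rw [if_pos hc, if_pos hc,
          ih out hnd.2 (fun p' hp' => hcf p' (List.mem_cons_of_mem _ hp')), List.nil_append]
    · rw [if_neg hc, if_neg hc]
      rw [ih (out.insert p.1 (v p.2)) hnd.2 ?fresh]
      case fresh =>
        intro p' hp'
        rw [PySem.Dict.contains_insert]
        have hne : p'.1 ≠ p.1 := fun e => hnd.1 (e ▸ List.mem_map_of_mem hp')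
        simp [hne, hcf p' (List.mem_cons_of_mem _ hp')]
      rw [PySem.Dict.items_insert_of_not_contains out _ (hcf p (List.mem_cons_self ..)),
          List.append_assoc, List.singleton_append]

-- sorted(set(j for j in L if 0 <= j < n)) is exactly the increasing list of indices of range(n) lying in L.
theorem idxs_eq (warr : List (List Int)) (L : List Int) :
  PySem.List.sorted (PySem.Set.ofList (L.filter (fun j => decide (0 ≤ j) && decide (j < PySem.List.len warr)))) (fun x => x) false
  = (PySem.List.pyRange 0 (PySem.List.len warr) 1).filter (fun j => L.contains j) := by
  apply PySem.List.sorted_eq_of_perm_of_pairwise_lt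
  · refine (List.perm_ext_iff_of_nodup (((PySem.List.nodup_pyRange_one _ _).filter _)) (PySem.Set.nodup_ofList _)).mpr ?_
    intro x
    simp only [List.mem_filter, PySem.List.mem_pyRange_one, PySem.Set.mem_ofList,
      Bool.and_eq_true, decide_eq_true_eq, List.contains_iff_mem]
    tauto
  · exact (PySem.List.pairwise_lt_pyRange_one 0 _).filter _

-- A's matched instances for index list L are the training rows at those indices, in index order.
theorem matched_eq (warr : List (List Int)) (L : List Int) :
  ((PySem.List.enumerate warr 0).filter (fun p => L.contains p.1)).map (·.2)
  = ((PySem.List.pyRange 0 (PySem.List.len warr) 1).filter (fun j => L.contains j)).map (fun j => PySem.List.pyGetD warr j []) := by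
  rw [PySem.List.enumerate_eq_map_pyRange warr ([] : List Int), List.filter_map, List.map_map]
  rfl

-- ===== VERDICT (by name: the statement is the Claim_ definition above) =====
theorem find_centroids_coordinates_spec : Claim_equal_find_centroids_coordinates := by
  intro index_dict warr _
  unfold Spec_find_centroids_coordinates
  simp only [find_centroids_coordinates, find_centroids_coordinates_alt]
  rw [outerA (fun i => (PySem.Dict.ofList index_dict).getD i []) (PySem.List.enumerate warr 0)
        ((PySem.Dict.ofList index_dict).keys) PySem.Dict.empty
        (PySem.Dict.nodup_keys_ofList index_dict) (fun k _ => PySem.Dict.contains_empty k)]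
  rw [outerB (fun L => (PySem.List.sorted (PySem.Set.ofList (L.filter (fun j => decide (0 ≤ j) && decide (j < PySem.List.len warr)))) (fun x => x) false).isEmpty)
        (fun L => (PySem.List.sorted (PySem.Set.ofList (L.filter (fun j => decide (0 ≤ j) && decide (j < PySem.List.len warr)))) (fun x => x) false).map (fun j => PySem.List.pyGetD warr j []))
        ((PySem.Dict.ofList index_dict).items) PySem.Dict.empty
        (PySem.Dict.nodup_keys_ofList index_dict) (fun p _ => PySem.Dict.contains_empty p.1)]
  rw [PySem.Dict.items_eq_map_keys (PySem.Dict.ofList index_dict) (PySem.Dict.nodup_keys_ofList index_dict) ([] : List Int),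
      List.flatMap_map]
  congr 1
  congr 1
  funext k
  simp only [matched_eq warr, idxs_eq warr, List.map_eq_nil_iff, List.isEmpty_iff]
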